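-- pv_equiv track=rewrite | github.com/calpoly-csai/api | QA.py | _format_prof_office_hours
-- ===== SOURCE A (Python) =====
-- import itertools
--
-- def _grammatical_join(substrings: list, last_two_join: str = "and"):
--     if len(substrings) == 0:
--         return ""
--     elif len(substrings) == 1:
--         return substrings[0]
--     elif len(substrings) == 2:
--         return f"{substrings[0]} {last_two_join} {substrings[1]}"
--     else:
--         substrings.append(f"{last_two_join} {substrings.pop()}")
--         return ", ".join(substrings)
--
-- def _format_prof_office_hours(prof: str, days: str):
--     hours = lambda x: x[1]
--
--     week = []
--     for token in days.split(", "):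
--         try:
--             d, h = token.split(" ", 1)
--         except ValueError:
--             continue
--         week.append((d, h))
--
--     if not week:
--         return f"{prof} currently has no office hours"
--
--     week.sort(key=hours)
--     groups = []
--     keys = []
--     for key, group in itertools.groupby(week, hours):
--         groups.append(list(group))
--         keys.append(key)
--
--     if keys[0] == "on leave":
--         return f"{prof} is currently on leave"
--
--     substrings = []
--     for g in groups:
--         ds = [d for d, _ in g]
--         k = hours(g[0]).replace("-", "to")
--         substrings.append(f"{_grammatical_join(ds)} {k}")
--
--     return f"{prof} has office hours {_grammatical_join(substrings)}"
-- ===== SOURCE B (Python) =====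
-- def _grammatical_join(substrings: list, last_two_join: str = "and"):
--     if len(substrings) == 0:
--         return ""
--     elif len(substrings) == 1:
--         return substrings[0]
--     elif len(substrings) == 2:
--         return f"{substrings[0]} {last_two_join} {substrings[1]}"
--     else:
--         substrings.append(f"{last_two_join} {substrings.pop()}")
--         return ", ".join(substrings)
--
-- def _format_prof_office_hours(prof: str, days: str):
--     # One pass: group days by hour string in a dict (insertion order), no sort of pairs, no groupby.
--     by_hour = {}
--     for token in days.split(", "):
--         parts = token.split(" ", 1)
--         if len(parts) != 2:
--             continue
--         d, h = parts
--         by_hour.setdefault(h, []).append(d)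
--
--     if not by_hour:
--         return f"{prof} currently has no office hours"
--
--     keys = sorted(by_hour)
--     if keys[0] == "on leave":
--         return f"{prof} is currently on leave"
--
--     substrings = [f"{_grammatical_join(by_hour[k])} {k.replace('-', 'to')}" for k in keys]
--     return f"{prof} has office hours {_grammatical_join(substrings)}"
-- ===== Notes on version B (the rewrite author's own statement) =====
-- stated objective: idiomatic
-- what changed: Replaces A's sort-the-pair-list + itertools.groupby pipeline by a single-pass dict grouping hour-string -> days (insertion order) followed by sorting only the distinct hour keys.
import Mathlib
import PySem

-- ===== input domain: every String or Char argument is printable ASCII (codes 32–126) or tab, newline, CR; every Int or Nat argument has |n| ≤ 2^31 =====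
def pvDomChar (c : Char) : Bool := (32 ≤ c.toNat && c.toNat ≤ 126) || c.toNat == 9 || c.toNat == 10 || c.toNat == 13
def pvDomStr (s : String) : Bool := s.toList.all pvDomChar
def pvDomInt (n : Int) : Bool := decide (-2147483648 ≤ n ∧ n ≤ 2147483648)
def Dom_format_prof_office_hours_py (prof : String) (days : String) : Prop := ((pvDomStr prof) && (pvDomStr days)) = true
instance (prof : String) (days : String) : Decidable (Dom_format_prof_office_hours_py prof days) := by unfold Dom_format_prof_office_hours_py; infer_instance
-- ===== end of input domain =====

-- B replaces A's sort-all-pairs + itertools.groupby pipeline by a single-pass dict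
-- grouping hour -> days and a sort of the distinct hour keys only (objective: idiomatic).

-- ===== PORT A =====
-- _grammatical_join (shared module helper, used by both implementations)
def pvGJoin (substrings : List String) (last_two_join : String) : String :=
  match substrings with
  | [] => ""
  | [a] => a
  | [a, b] => a ++ " " ++ last_two_join ++ " " ++ b
  | a :: b :: c :: rest =>
      let ys := a :: b :: c :: rest
      PySem.Str.join ", " (ys.dropLast ++ [last_two_join ++ " " ++ ys.getLast!])

-- itertools.groupby run extraction: the maximal prefix with key = k, and the remainder
def pvTakeRun (k : String) : List (String × String) → List (String × String) × List (String × String)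
  | [] => ([], [])
  | w :: ws =>
      if w.2 == k then
        let p := pvTakeRun k ws
        (w :: p.1, p.2)
      else ([], w :: ws)

theorem pvTakeRun_rest_length (k : String) (ws : List (String × String)) :
    (pvTakeRun k ws).2.length ≤ ws.length := by
  induction ws with
  | nil => simp [pvTakeRun]
  | cons w ws ih =>
    simp only [pvTakeRun]
    split
    · simpa using Nat.le_succ_of_le ih
    · simp

-- itertools.groupby(week, hours) consumed into (groups, keys)
def pvGroupby : List (String × String) → List (List (String × String)) × List String
  | [] => ([], [])
  | w :: ws =>
      let p := pvTakeRun w.2 ws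
      let q := pvGroupby p.2
      ((w :: p.1) :: q.1, w.2 :: q.2)
  termination_by ws => ws.length
  decreasing_by
    simp only [List.length_cons, Nat.lt_succ_iff]
    exact pvTakeRun_rest_length w.2 ws

def format_prof_office_hours_py (prof : String) (days : String) : String :=
  -- week-building loop: token.split(" ", 1) succeeding ↔ two parts
  let week : List (String × String) :=
    ((PySem.Str.split? days ", ").getD []).foldl (fun w t =>
      match PySem.Str.splitMax? t " " 1 with
      | some [d, h] => w ++ [(d, h)]
      | _ => w) []
  if week = [] then prof ++ " currently has no office hours"
  else
    let sw := PySem.List.sorted week (fun x => x.2) false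
    let gk := pvGroupby sw
    if PySem.List.pyGetD gk.2 0 "" == "on leave" then prof ++ " is currently on leave"
    else
      let substrings := gk.1.foldl (fun acc g =>
        acc ++ [pvGJoin (g.map (fun p => p.1)) "and" ++ " " ++
                PySem.Str.replace (PySem.List.pyGetD g 0 ("", "")).2 "-" "to"]) []
      prof ++ " has office hours " ++ pvGJoin substrings "and"

-- ===== PORT B =====
def format_prof_office_hours_py_alt (prof : String) (days : String) : String :=
  let byHour : PySem.Dict String (List String) :=
    ((PySem.Str.split? days ", ").getD []).foldl (fun dd t =>
      let parts := (PySem.Str.splitMax? t " " 1).getD []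
      if parts.length == 2 then
        (dd.modify (parts.getD 1 "") [] (fun v => v ++ [parts.getD 0 ""]))
      else dd) PySem.Dict.empty
  if byHour.items = [] then prof ++ " currently has no office hours"
  else
    let ks := PySem.List.sorted byHour.keys (fun k => k) false
    if PySem.List.pyGetD ks 0 "" == "on leave" then prof ++ " is currently on leave"
    else
      prof ++ " has office hours " ++
        pvGJoin (ks.map (fun k =>
          pvGJoin (byHour.getD k []) "and" ++ " " ++ PySem.Str.replace k "-" "to")) "and"

-- ===== PRECONDITION & SPEC =====
def Spec_format_prof_office_hours_py (prof : String) (days : String) (out : String) : Prop := out = format_prof_office_hours_py_alt prof days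
instance (prof : String) (days : String) (out : String) : Decidable (Spec_format_prof_office_hours_py prof days out) := by unfold Spec_format_prof_office_hours_py; infer_instance

-- ===== CLAIM (what is proved, stated in full; the proofs are below) =====
def Claim_equal_format_prof_office_hours_py : Prop := ∀ (prof : String) (days : String), Dom_format_prof_office_hours_py prof days → Spec_format_prof_office_hours_py prof days (format_prof_office_hours_py prof days)

-- ===== LEMMAS AND PROOFS =====


def pvParse (t : String) : Option (String × String) :=
  match PySem.Str.splitMax? t " " 1 with
  | some [d, h] => some (d, h)
  | _ => none

theorem pvWeekFold (ts : List String) (acc : List (String × String)) :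
    ts.foldl (fun w t =>
      match PySem.Str.splitMax? t " " 1 with
      | some [d, h] => w ++ [(d, h)]
      | _ => w) acc = acc ++ ts.filterMap pvParse := by
  induction ts generalizing acc with
  | nil => simp
  | cons t ts ih =>
    simp only [List.foldl_cons, List.filterMap_cons]
    rcases h : PySem.Str.splitMax? t " " 1 with _ | (_ | ⟨d, _ | ⟨hh, _ | ⟨x, rest⟩⟩⟩) <;>
      simp [pvParse, h, ih]

theorem pvDictFold (ts : List String) (dd : PySem.Dict String (List String)) :
    ts.foldl (fun dd t =>
      let parts := (PySem.Str.splitMax? t " " 1).getD []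
      if parts.length == 2 then
        (dd.modify (parts.getD 1 "") [] (fun v => v ++ [parts.getD 0 ""]))
      else dd) dd =
    (ts.filterMap pvParse).foldl (fun dd p => dd.modify p.2 [] (fun v => v ++ [p.1])) dd := by
  induction ts generalizing dd with
  | nil => simp
  | cons t ts ih =>
    simp only [List.foldl_cons, List.filterMap_cons]
    rcases h : PySem.Str.splitMax? t " " 1 with _ | (_ | ⟨d, _ | ⟨hh, _ | ⟨x, rest⟩⟩⟩)
    · have hp : pvParse t = none := by simp [pvParse, h]
      simp only [hp, Option.getD_none]
      simpa using ih dd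
    · have hp : pvParse t = none := by simp [pvParse, h]
      simp only [hp, Option.getD_some]
      simpa using ih dd
    · have hp : pvParse t = none := by simp [pvParse, h]
      simp only [hp, Option.getD_some]
      simpa using ih dd
    · have hp : pvParse t = some (d, hh) := by simp [pvParse, h]
      simp only [hp, Option.getD_some]
      simpa [List.getD] using ih (dd.modify hh [] (fun v => v ++ [d]))
    · have hp : pvParse t = none := by simp [pvParse, h]
      simp only [hp, Option.getD_some]
      simpa using ih dd

theorem pvDictGetD (ws : List (String × String)) (k : String) :
    ((ws.map (fun p => (p.2, p.1))).foldl
      (fun dd p => dd.modify p.1 [] (fun v => v ++ [p.2])) PySem.Dict.empty).getD k [] =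
    (ws.filter (fun p => p.2 == k)).map (fun p => p.1) := by
  simp [PySem.Dict.getD_foldl_modify_append, List.filter_map, List.map_map, Function.comp_def]

theorem pvDictKeys (ws : List (String × String)) :
    ((ws.map (fun p => (p.2, p.1))).foldl
      (fun dd p => dd.modify p.1 [] (fun v => v ++ [p.2])) PySem.Dict.empty).keys =
    PySem.Set.ofList (ws.map (fun p => p.2)) := by
  rw [PySem.Dict.keys_foldl_modify_key (ws.map (fun p => (p.2, p.1))) (fun p => p.1) []
    (fun _ p => fun v => v ++ [p.2]) PySem.Dict.empty]
  simp [List.map_map, Function.comp_def, PySem.Set.update, PySem.Set.ofList_eq_foldl]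


theorem pvFilterInsertBy (k : String) (x : String × String) (acc : List (String × String))
    (hs : acc.Pairwise (fun a b => a.2 ≤ b.2)) :
    (PySem.List.insertBy (fun a b => decide (a.2 < b.2)) x acc).filter (fun w => w.2 == k) =
    acc.filter (fun w => w.2 == k) ++ (if x.2 == k then [x] else []) := by
  induction acc with
  | nil =>
    by_cases hx : x.2 = k <;> simp [PySem.List.insertBy, hx]
  | cons y ys ih =>
    rcases List.pairwise_cons.mp hs with ⟨hy, hys⟩
    simp only [PySem.List.insertBy]
    by_cases hlt : x.2 < y.2
    · simp only [hlt, decide_true, if_true]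
      by_cases hx : x.2 = k
      · subst hx
        have h1 : (y :: ys).filter (fun w => w.2 == x.2) = [] := by
          apply List.filter_eq_nil_iff.mpr
          intro z hz
          have : x.2 < z.2 := by
            rcases List.mem_cons.mp hz with h | h
            · exact h ▸ hlt
            · exact lt_of_lt_of_le hlt (hy z h)
          simp [ne_of_gt this]
        simp [h1]
      · have hx' : (x.2 == k) = false := by simpa using hx
        simp [List.filter_cons, hx']
    · rw [if_neg (by simpa using hlt)]
      simp only [List.filter_cons, ih hys]
      by_cases hyk : (y.2 == k) = true <;> simp [hyk]

theorem pvSortedFilter (ws : List (String × String)) (k : String) :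
    (PySem.List.sorted ws (fun x => x.2) false).filter (fun w => w.2 == k) =
    ws.filter (fun w => w.2 == k) := by
  induction ws using List.reverseRecOn with
  | nil => simp [PySem.List.sorted]
  | append_singleton ws x ih =>
    have hstep : PySem.List.sorted (ws ++ [x]) (fun p : String × String => p.2) false =
        PySem.List.insertBy (fun a b => decide (a.2 < b.2)) x
          (PySem.List.sorted ws (fun p => p.2) false) := by
      rw [PySem.List.sorted_eq_foldl_insertBy, PySem.List.sorted_eq_foldl_insertBy,
        List.foldl_append]
      rfl
    rw [hstep, pvFilterInsertBy k x _ (PySem.List.sorted_pairwise ws (fun p => p.2)), ih,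
      List.filter_append]
    simp [List.filter_cons]

theorem pvDictSwap (ws : List (String × String)) (dd : PySem.Dict String (List String)) :
    ws.foldl (fun dd p => dd.modify p.2 [] (fun v => v ++ [p.1])) dd =
    (ws.map (fun p => (p.2, p.1))).foldl (fun dd p => dd.modify p.1 [] (fun v => v ++ [p.2])) dd := by
  rw [List.foldl_map]

theorem pvTakeRun_spec (k : String) (ws : List (String × String)) :
    ws = (pvTakeRun k ws).1 ++ (pvTakeRun k ws).2 ∧
    (∀ u ∈ (pvTakeRun k ws).1, u.2 = k) ∧
    (∀ h t, (pvTakeRun k ws).2 = h :: t → h.2 ≠ k) := by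
  induction ws with
  | nil => simp [pvTakeRun]
  | cons w ws ih =>
    by_cases hw : (w.2 == k) = true
    · simp only [pvTakeRun, hw, if_true]
      obtain ⟨e1, e2, e3⟩ := ih
      refine ⟨by simpa using e1, ?_, e3⟩
      intro u hu
      rcases List.mem_cons.mp hu with h | h
      · subst h; exact eq_of_beq hw
      · exact e2 u h
    · simp only [pvTakeRun, hw]
      refine ⟨rfl, by simp, ?_⟩
      intro h t he
      cases he
      simpa using hw

theorem pvFoldlAddSublist {α : Type} [BEq α] [LawfulBEq α] (xs : List α) (acc : List α) :
    (xs.foldl PySem.Set.add acc).Sublist (acc ++ xs) := by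
  induction xs generalizing acc with
  | nil => simp
  | cons x xs ih =>
    simp only [List.foldl_cons]
    refine (ih (PySem.Set.add acc x)).trans ?_
    rw [PySem.Set.add_eq_ite]
    by_cases hx : x ∈ acc
    · simp only [hx, if_true]
      exact List.Sublist.append_left (List.sublist_cons_self x xs) acc
    · simp [hx]
theorem pvOfListSublist {α : Type} [BEq α] [LawfulBEq α] (xs : List α) :
    (PySem.Set.ofList xs).Sublist xs := by
  rw [PySem.Set.ofList_eq_foldl]
  simpa using pvFoldlAddSublist xs []

theorem pvFoldlAddRun {α : Type} [BEq α] [LawfulBEq α] (c : α) (l : List α)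
    (h : ∀ a ∈ l, a = c) : l.foldl PySem.Set.add [c] = [c] := by
  induction l with
  | nil => rfl
  | cons a l ih =>
    have ha : a = c := h a (by simp)
    subst ha
    simp only [List.foldl_cons, PySem.Set.add_eq_ite, List.mem_singleton]
    exact ih (fun b hb => h b (by simp [hb]))

theorem pvFoldlAddCons {α : Type} [BEq α] [LawfulBEq α] (c : α) (l : List α) (s : List α)
    (h : ∀ a ∈ l, a ≠ c) : l.foldl PySem.Set.add (c :: s) = c :: l.foldl PySem.Set.add s := by
  induction l generalizing s with
  | nil => rfl
  | cons a l ih =>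
    have ha : a ≠ c := h a (by simp)
    have : PySem.Set.add (c :: s) a = c :: PySem.Set.add s a := by
      rw [PySem.Set.add_eq_ite, PySem.Set.add_eq_ite]
      by_cases hm : a ∈ s <;> simp [hm, ha]
    simp only [List.foldl_cons, this]
    exact ih (PySem.Set.add s a) (fun b hb => h b (by simp [hb]))

theorem pvOfListRun {α : Type} [BEq α] [LawfulBEq α] (c : α) (l1 l2 : List α)
    (h1 : l1 ≠ []) (h2 : ∀ a ∈ l1, a = c) (h3 : ∀ a ∈ l2, a ≠ c) :
    PySem.Set.ofList (l1 ++ l2) = c :: PySem.Set.ofList l2 := by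
  rcases l1 with _ | ⟨b, l1'⟩
  · exact absurd rfl h1
  have hb : b = c := h2 b (by simp)
  subst hb
  rw [PySem.Set.ofList_eq_foldl, PySem.Set.ofList_eq_foldl]
  calc ((b :: l1') ++ l2).foldl PySem.Set.add []
      = l2.foldl PySem.Set.add (l1'.foldl PySem.Set.add [b]) := by
        simp [List.foldl_append]
    _ = l2.foldl PySem.Set.add [b] := by
        rw [pvFoldlAddRun b l1' (fun a ha => h2 a (by simp [ha]))]
    _ = b :: l2.foldl PySem.Set.add [] := pvFoldlAddCons b l2 [] h3


theorem pvGroupbySortedAux : ∀ (n : Nat) (ws : List (String × String)), ws.length ≤ n →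
    ws.Pairwise (fun a b => a.2 ≤ b.2) →
    pvGroupby ws =
      ((PySem.Set.ofList (ws.map (fun p => p.2))).map (fun k => ws.filter (fun p => p.2 == k)),
       PySem.Set.ofList (ws.map (fun p => p.2))) := by
  intro n
  induction n with
  | zero =>
    intro ws hlen _
    rw [List.length_eq_zero_iff.mp (Nat.le_zero.mp hlen)]
    simp [pvGroupby]
  | succ n ih =>
    intro ws hlen hp
    rcases ws with _ | ⟨w, ws0⟩
    · simp [pvGroupby]
    obtain ⟨e1, e2, e3⟩ := pvTakeRun_spec w.2 ws0
    rcases List.pairwise_cons.mp hp with ⟨hw, hws0⟩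
    have hsub : ((pvTakeRun w.2 ws0).2).Sublist ws0 := by
      conv_rhs => rw [e1]
      exact List.sublist_append_right _ _
    have hrestpw : ((pvTakeRun w.2 ws0).2).Pairwise (fun a b => a.2 ≤ b.2) :=
      hws0.sublist hsub
    have hne : ∀ v ∈ (pvTakeRun w.2 ws0).2, v.2 ≠ w.2 := by
      rcases hrest : (pvTakeRun w.2 ws0).2 with _ | ⟨h0, t⟩
      · simp
      · have hh0 : h0.2 ≠ w.2 := e3 h0 t hrest
        have hmem : h0 ∈ ws0 := by rw [e1, hrest]; simp
        have hlt : w.2 < h0.2 := lt_of_le_of_ne (hw h0 hmem) (Ne.symm hh0)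
        intro v hv
        rcases List.mem_cons.mp hv with h | h
        · subst h; exact hh0
        · have : h0.2 ≤ v.2 := (List.pairwise_cons.mp (hrest ▸ hrestpw)).1 v h
          exact ne_of_gt (lt_of_lt_of_le hlt this)
    have hlen2 : ((pvTakeRun w.2 ws0).2).length ≤ n := by
      have := pvTakeRun_rest_length w.2 ws0
      simp only [List.length_cons] at hlen
      omega
    have IH := ih _ hlen2 hrestpw
    have hkeys : PySem.Set.ofList ((w :: ws0).map (fun p => p.2)) =
        w.2 :: PySem.Set.ofList (((pvTakeRun w.2 ws0).2).map (fun p => p.2)) := by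
      have hsplit : (w :: ws0).map (fun p : String × String => p.2) =
          (w.2 :: ((pvTakeRun w.2 ws0).1).map (fun p => p.2)) ++
            ((pvTakeRun w.2 ws0).2).map (fun p => p.2) := by
        conv_lhs => rw [e1]
        simp
      rw [hsplit]
      apply pvOfListRun
      · simp
      · intro a ha
        rcases List.mem_cons.mp ha with h | h
        · exact h
        · rcases List.mem_map.mp h with ⟨u, hu, he⟩
          exact he ▸ e2 u hu
      · intro a ha
        rcases List.mem_map.mp ha with ⟨v, hv, he⟩
        exact he ▸ hne v hv
    have hfw : (w :: ws0).filter (fun p => p.2 == w.2) = w :: (pvTakeRun w.2 ws0).1 := by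
      rw [List.filter_cons]
      simp only [beq_self_eq_true, if_true]
      congr 1
      conv_lhs => rw [e1]
      rw [List.filter_append, List.filter_eq_self.mpr (fun u hu => by simpa using e2 u hu),
        List.filter_eq_nil_iff.mpr (fun v hv => by simpa using hne v hv)]
      simp
    have htail : ∀ k ∈ PySem.Set.ofList (((pvTakeRun w.2 ws0).2).map (fun p => p.2)),
        (w :: ws0).filter (fun p => p.2 == k) = ((pvTakeRun w.2 ws0).2).filter (fun p => p.2 == k) := by
      intro k hk
      rcases List.mem_map.mp ((PySem.Set.mem_ofList _ _).mp hk) with ⟨v, hv, he⟩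
      have hkw : k ≠ w.2 := he ▸ hne v hv
      rw [List.filter_cons]
      simp only [show (w.2 == k) = false by simpa using (Ne.symm hkw)]
      conv_lhs => rw [e1]
      rw [List.filter_append,
        List.filter_eq_nil_iff.mpr (fun u hu => by simp [e2 u hu, Ne.symm hkw]), List.nil_append]
      simp
    show pvGroupby (w :: ws0) = _
    rw [pvGroupby]
    rw [hkeys, IH]
    simp only [List.map_cons, hfw]
    refine Prod.ext ?_ rfl
    simp only
    congr 1
    exact (List.map_congr_left htail).symm

theorem pvGroupbySorted (ws : List (String × String))
    (hp : (ws.map (fun p => p.2)).Pairwise (fun a b => a ≤ b)) :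
    pvGroupby ws =
      ((PySem.Set.ofList (ws.map (fun p => p.2))).map (fun k => ws.filter (fun p => p.2 == k)),
       PySem.Set.ofList (ws.map (fun p => p.2))) :=
  pvGroupbySortedAux ws.length ws le_rfl (List.pairwise_map.mp hp)

-- ofList of a non-empty list is non-empty
theorem pvOfListEqNil {α : Type} [BEq α] [LawfulBEq α] (xs : List α) :
    PySem.Set.ofList xs = [] ↔ xs = [] := by
  constructor
  · intro h
    rcases xs with _ | ⟨a, t⟩
    · rfl
    · have : a ∈ PySem.Set.ofList (a :: t) := (PySem.Set.mem_ofList _ _).mpr (by simp)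
      rw [h] at this
      cases this
  · intro h; subst h; rfl

-- the grouping dict is empty iff the parsed week is empty
theorem pvItemsNil (ws : List (String × String)) :
    ((ws.map (fun p => (p.2, p.1))).foldl
      (fun dd p => dd.modify p.1 [] (fun v => v ++ [p.2])) PySem.Dict.empty).items = [] ↔ ws = [] := by
  constructor
  · intro h
    have hk := pvDictKeys ws
    have : PySem.Set.ofList (ws.map (fun p => p.2)) = [] := by
      rw [← hk]
      simp only [PySem.Dict.keys, h, List.map_nil]
    rcases (List.map_eq_nil_iff.mp ((pvOfListEqNil _).mp this)) with h'
    exact h'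
  · intro h; subst h; rfl

-- ===== VERDICT (by name: the statement is the Claim_ definition above) =====
theorem format_prof_office_hours_py_spec : Claim_equal_format_prof_office_hours_py := by
  intro prof days _
  unfold Spec_format_prof_office_hours_py
  simp only [format_prof_office_hours_py, format_prof_office_hours_py_alt,
    pvWeekFold, pvDictFold, List.nil_append, pvDictSwap]
  set ws := ((PySem.Str.split? days ", ").getD []).filterMap pvParse with hws
  by_cases hws0 : ws = []
  · rw [hws0]
    have he : (PySem.Dict.empty : PySem.Dict String (List String)).items = [] := rfl
    simp [he]
  · have hB : ¬ (((ws.map (fun p => (p.2, p.1))).foldl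
        (fun dd p => dd.modify p.1 [] (fun v => v ++ [p.2])) PySem.Dict.empty).items = []) := by
      rw [pvItemsNil]; exact hws0
    rw [if_neg hws0, if_neg hB]
    have hp := PySem.List.sorted_map_key_pairwise ws (fun p : String × String => p.2)
    rw [pvGroupbySorted _ hp, pvDictKeys]
    have hks : PySem.List.sorted (PySem.Set.ofList (ws.map (fun p => p.2))) (fun k => k) false =
        PySem.Set.ofList ((PySem.List.sorted ws (fun x => x.2) false).map (fun p => p.2)) := by
      apply PySem.List.sorted_id_eq_of_perm_of_pairwise
      · rw [List.perm_ext_iff_of_nodup (PySem.Set.nodup_ofList _) (PySem.Set.nodup_ofList _)]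
        intro a
        simp [PySem.Set.mem_ofList, PySem.List.mem_sorted]
      · exact List.Pairwise.sublist (pvOfListSublist _) hp
    rw [hks]
    by_cases hol : (PySem.List.pyGetD
        (PySem.Set.ofList ((PySem.List.sorted ws (fun x => x.2) false).map (fun p => p.2))) 0 ""
          == "on leave") = true
    · rw [if_pos hol, if_pos hol]
    · rw [if_neg hol, if_neg hol]
      simp only [PySem.List.foldl_append_singleton_eq_map, List.nil_append, List.map_map]
      congr 2
      apply List.map_congr_left
      intro k hk
      simp only [Function.comp_def]
      rcases List.mem_map.mp ((PySem.Set.mem_ofList _ _).mp hk) with ⟨v, hv, hvk⟩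
      have hvw : v ∈ ws := (PySem.List.mem_sorted _ _ _ _).mp hv
      have hvf : v ∈ ws.filter (fun p => p.2 == k) :=
        List.mem_filter.mpr ⟨hvw, by simp [hvk]⟩
      rw [pvSortedFilter, pvDictGetD]
      rcases hX : ws.filter (fun p => p.2 == k) with _ | ⟨x, xs⟩
      · rw [hX] at hvf; cases hvf
      · have hx : x.2 = k := by
          have := List.of_mem_filter (p := fun p : String × String => p.2 == k)
            (a := x) (by rw [hX]; simp)
          simpa using this
        rw [hX, PySem.List.pyGetD_zero_cons, hx]
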